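-- pv_equiv track=rewrite | github.com/avi-verma-web/coding_ninjas_data_structures | recursion/recursion_assignment/checkAB.py | checkAB
-- ===== SOURCE A (Python) =====
-- def checkAB(str):
--     if len(str) == 0:
--         return True
--     if str[0] == 'a':
--         if str[1:3] == 'bb':
--             return checkAB(str[3:])
--         else:
--             return checkAB(str[1:])
--     else:
--         return False
-- ===== SOURCE B (Python) =====
-- def checkAB(str):
--     i, n = 0, len(str)
--     while i < n:
--         if str[i] != 'a':
--             return False
--         if str[i+1:i+3] == 'bb':
--             i += 3
--         else:
--             i += 1
--     return True
-- ===== Notes on version B (the rewrite author's own statement) =====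
-- stated objective: faster
-- what changed: Replaced the recursive implementation that re-slices the whole remaining string at every step with an iterative index-pointer scan that never copies the string.
import Mathlib
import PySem

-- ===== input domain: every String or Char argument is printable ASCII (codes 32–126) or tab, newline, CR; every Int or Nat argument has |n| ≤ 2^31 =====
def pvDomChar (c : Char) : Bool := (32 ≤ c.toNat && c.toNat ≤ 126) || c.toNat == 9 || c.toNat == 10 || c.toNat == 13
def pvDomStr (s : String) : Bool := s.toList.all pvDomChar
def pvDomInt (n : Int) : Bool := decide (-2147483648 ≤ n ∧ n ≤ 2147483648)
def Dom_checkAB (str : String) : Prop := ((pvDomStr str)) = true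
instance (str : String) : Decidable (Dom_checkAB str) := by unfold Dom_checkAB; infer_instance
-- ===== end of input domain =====

-- B replaces A's recursion-with-slicing by an iterative index-pointer scan: faster (no per-step string copies).

-- ===== PORT A =====
-- A's recursion over the (list of code points of the) string; slices via PySem.List.slice.
def checkABGo : List Char → Bool
  | [] => true
  | c :: rest =>
    if c = 'a' then
      if PySem.List.slice (c :: rest) (some 1) (some 3) = ['b', 'b'] then
        checkABGo (PySem.List.slice (c :: rest) (some 3) none)
      else
        checkABGo (PySem.List.slice (c :: rest) (some 1) none)
    else false
  termination_by s => s.length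
  decreasing_by
    · rw [PySem.List.slice_from _ (by norm_num : (0:Int) ≤ 3)]; simp
    · rw [PySem.List.slice_from _ (by norm_num : (0:Int) ≤ 1)]; simp

def checkAB (str : String) : Bool := checkABGo str.toList

-- ===== PORT B =====
-- B's while-loop over an index pointer i; the loop variable i is a Nat because it starts
-- at 0 and only increases. str[i] is in range under the loop guard; str[i+1:i+3] via PySem.List.slice.
def checkABAltGo (s : List Char) (i : Nat) : Bool :=
  if h : i < s.length then
    if s[i] ≠ 'a' then false
    else if PySem.List.slice s (some ((i : Int) + 1)) (some ((i : Int) + 3)) = ['b', 'b'] then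
      checkABAltGo s (i + 3)
    else
      checkABAltGo s (i + 1)
  else true
  termination_by s.length - i

def checkAB_alt (str : String) : Bool := checkABAltGo str.toList 0

-- ===== PRECONDITION & SPEC =====
def Spec_checkAB (str : String) (out : Bool) : Prop := out = checkAB_alt str
instance (str : String) (out : Bool) : Decidable (Spec_checkAB str out) := by unfold Spec_checkAB; infer_instance

-- ===== CLAIM (what is proved, stated in full; the proofs are below) =====
def Claim_equal_checkAB : Prop := ∀ (str : String), Dom_checkAB str → Spec_checkAB str (checkAB str)

-- ===== LEMMAS AND PROOFS =====

theorem checkABAltGo_eq_go (s : List Char) (i : Nat) :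
    checkABAltGo s i = checkABGo (s.drop i) := by
  induction i using checkABAltGo.induct s with
  | case1 i h hc =>
      rw [checkABAltGo]
      simp only [dif_pos h, if_pos hc]
      rw [List.drop_eq_getElem_cons h, checkABGo]
      simp [hc]
  | case2 i h hc hs ih =>
      rw [checkABAltGo]
      simp only [dif_pos h, if_neg hc, if_pos hs]
      rw [List.drop_eq_getElem_cons h, checkABGo]
      push Not at hc
      rw [if_pos hc]
      have hslice :
          PySem.List.slice (s[i] :: s.drop (i + 1)) (some 1) (some 3)
            = PySem.List.slice s (some ((i : Int) + 1)) (some ((i : Int) + 3)) := by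
        have h1 : PySem.List.slice (s[i] :: s.drop (i + 1)) (some ((1:Nat) : Int)) (some ((3:Nat) : Int))
            = ((s[i] :: s.drop (i + 1)).drop 1).take 2 := by
          rw [PySem.List.slice_natCast]
        have h2 : PySem.List.slice s (some (((i+1 : Nat)) : Int)) (some (((i+3 : Nat)) : Int))
            = (s.drop (i+1)).take 2 := by
          rw [PySem.List.slice_natCast]; congr 1; omega
        push_cast at h1 h2
        rw [h1, h2]; simp
      rw [hslice, if_pos hs]
      have hdrop :
          PySem.List.slice (s[i] :: s.drop (i + 1)) (some 3) none = s.drop (i + 3) := by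
        rw [PySem.List.slice_from _ (by norm_num : (0:Int) ≤ 3)]
        have : (s[i] :: s.drop (i + 1)).drop 3 = (s.drop (i+1)).drop 2 := by simp
        rw [show ((3:Int).toNat) = 3 from rfl, this, List.drop_drop]
      rw [hdrop, ih]
  | case3 i h hc hs ih =>
      rw [checkABAltGo]
      simp only [dif_pos h, if_neg hc, if_neg hs]
      rw [List.drop_eq_getElem_cons h, checkABGo]
      push Not at hc
      rw [if_pos hc]
      have hslice :
          PySem.List.slice (s[i] :: s.drop (i + 1)) (some 1) (some 3)
            = PySem.List.slice s (some ((i : Int) + 1)) (some ((i : Int) + 3)) := by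
        have h1 : PySem.List.slice (s[i] :: s.drop (i + 1)) (some ((1:Nat) : Int)) (some ((3:Nat) : Int))
            = ((s[i] :: s.drop (i + 1)).drop 1).take 2 := by
          rw [PySem.List.slice_natCast]
        have h2 : PySem.List.slice s (some (((i+1 : Nat)) : Int)) (some (((i+3 : Nat)) : Int))
            = (s.drop (i+1)).take 2 := by
          rw [PySem.List.slice_natCast]; congr 1; omega
        push_cast at h1 h2
        rw [h1, h2]; simp
      rw [hslice, if_neg hs]
      have htail :
          PySem.List.slice (s[i] :: s.drop (i + 1)) (some 1) none = s.drop (i + 1) := by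
        rw [PySem.List.slice_from _ (by norm_num : (0:Int) ≤ 1)]
        simp
      rw [htail, ih]
  | case4 i h =>
      rw [checkABAltGo]
      simp only [dif_neg h]
      rw [List.drop_of_length_le (by omega), checkABGo]

-- ===== VERDICT (by name: the statement is the Claim_ definition above) =====
theorem checkAB_spec : Claim_equal_checkAB := by
  intro str _
  unfold Spec_checkAB checkAB checkAB_alt
  rw [checkABAltGo_eq_go, List.drop_zero]
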